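-- pv_equiv track=rewrite | github.com/Yumoon493/Undergraduate-Code-Collection | Python-code/测试.py | fenzu
-- ===== SOURCE A (Python) =====
-- def fenzu(sequence):
--     l = []
--     r = []
--     m = []
--     for i in range(len(sequence)):
--         p = sequence[(len(sequence) - 1) // 2]
--         if sequence[i] < p:
--             l.append(sequence[i])
--         elif sequence[i] > p:
--             r.append(sequence[i])
--         else:
--             m.append(p)
--     sequence = l + m + r
--     return sequence,l,r,m
-- ===== SOURCE B (Python) =====
-- def fenzu(sequence):
--     if not sequence:
--         return [], [], [], []
--     p = sequence[(len(sequence) - 1) // 2]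
--     tagged = [((x > p) - (x < p), x) for x in sequence]
--     tagged.sort(key=lambda t: t[0])  # stable: original order kept within each tag
--     tags = [c for c, _ in tagged]
--     i = tags.count(-1)
--     j = i + tags.count(0)
--     l = [x for _, x in tagged[:i]]
--     m = [p] * (j - i)
--     r = [x for _, x in tagged[j:]]
--     return l + m + r, l, r, m
-- ===== Notes on version B (the rewrite author's own statement) =====
-- stated objective: alternative
-- what changed: B replaces A's single classifying loop with a tag/stable-sort/slice algorithm: each element is tagged with the sign of its comparison to the middle-index pivot, the tagged list is stably sorted by tag, and l, m, r are read off as slices of the sorted list using tag counts.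
import Mathlib
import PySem

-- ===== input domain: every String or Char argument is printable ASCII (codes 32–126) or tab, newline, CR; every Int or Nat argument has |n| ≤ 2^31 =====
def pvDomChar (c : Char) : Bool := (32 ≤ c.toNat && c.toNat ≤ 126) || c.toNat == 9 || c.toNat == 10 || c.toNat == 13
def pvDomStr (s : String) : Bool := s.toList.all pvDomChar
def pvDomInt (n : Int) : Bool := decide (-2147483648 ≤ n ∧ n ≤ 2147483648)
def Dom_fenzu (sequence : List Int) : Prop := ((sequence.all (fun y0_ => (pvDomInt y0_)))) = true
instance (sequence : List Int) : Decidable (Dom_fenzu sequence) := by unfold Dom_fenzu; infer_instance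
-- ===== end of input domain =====

-- B replaces A's single classifying loop by a tag / stable-sort-by-tag / slice-by-counts algorithm (objective: alternative).

-- ===== PORT A =====
-- indices i and (len-1)//2 are always in range while the loop runs on a nonempty list, so pyGetD with default 0 is exact
def fenzu (sequence : List Int) : List Int × List Int × List Int × List Int :=
  let s := (PySem.List.pyRange 0 (sequence.length : Int) 1).foldl
    (fun (acc : List Int × List Int × List Int) i =>
      let p := PySem.List.pyGetD sequence (PySem.Int.floordiv ((sequence.length : Int) - 1) 2) 0
      let x := PySem.List.pyGetD sequence i 0
      if x < p then (acc.1 ++ [x], acc.2.1, acc.2.2)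
      else if x > p then (acc.1, acc.2.1 ++ [x], acc.2.2)
      else (acc.1, acc.2.1, acc.2.2 ++ [p])) ([], [], [])
  (s.1 ++ s.2.2 ++ s.2.1, s.1, s.2.1, s.2.2)

-- ===== PORT B =====
def fenzu_alt (sequence : List Int) : List Int × List Int × List Int × List Int :=
  if sequence.isEmpty then ([], [], [], []) else
  let p := PySem.List.pyGetD sequence (PySem.Int.floordiv ((sequence.length : Int) - 1) 2) 0
  let tagged := sequence.map (fun x => ((if p < x then (1 : Int) else 0) - (if x < p then 1 else 0), x))
  let sortedT := PySem.List.sorted tagged (fun t => t.1)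
  let tags := sortedT.map (fun t => t.1)
  let i : Int := (tags.count (-1) : Nat)
  let j : Int := i + (tags.count 0 : Nat)
  let l := (PySem.List.slice sortedT none (some i)).map (fun t => t.2)
  let m := PySem.List.pyRepeat [p] (j - i)
  let r := (PySem.List.slice sortedT (some j) none).map (fun t => t.2)
  (l ++ m ++ r, l, r, m)

-- ===== PRECONDITION & SPEC =====
def Spec_fenzu (sequence : List Int) (out : List Int × List Int × List Int × List Int) : Prop := out = fenzu_alt sequence
instance (sequence : List Int) (out : List Int × List Int × List Int × List Int) : Decidable (Spec_fenzu sequence out) := by unfold Spec_fenzu; infer_instance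

-- ===== CLAIM =====
def Claim_equal_fenzu : Prop := ∀ (sequence : List Int), Dom_fenzu sequence → Spec_fenzu sequence (fenzu sequence)

-- ===== LEMMAS AND PROOFS =====

-- A's loop is the three filters (characterisation of A's accumulators)
theorem fenzu_loop (p : Int) (xs : List Int) : ∀ (l r m : List Int),
    xs.foldl (fun (acc : List Int × List Int × List Int) x =>
      if x < p then (acc.1 ++ [x], acc.2.1, acc.2.2)
      else if x > p then (acc.1, acc.2.1 ++ [x], acc.2.2)
      else (acc.1, acc.2.1, acc.2.2 ++ [p])) (l, r, m)
    = (l ++ xs.filter (fun x => x < p),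
       r ++ xs.filter (fun x => p < x),
       m ++ (xs.filter (fun x => x == p)).map (fun _ => p)) := by
  induction xs with
  | nil => intro l r m; simp
  | cons a t ih =>
    intro l r m
    by_cases h1 : a < p
    · have hne : a ≠ p := by omega
      simpa [List.foldl_cons, h1, List.filter_cons, not_lt_of_gt h1, hne] using ih (l ++ [a]) r m
    · by_cases h2 : p < a
      · have hne : a ≠ p := by omega
        simpa [List.foldl_cons, h1, h2, List.filter_cons, hne] using ih l (r ++ [a]) m
      · have he : a = p := le_antisymm (not_lt.mp h2) (not_lt.mp h1)
        simpa [List.foldl_cons, h1, h2, List.filter_cons, he] using ih l r (m ++ [p])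

-- insertBy lands exactly between a prefix it is not-before and a suffix whose head it is before
theorem insertBy_mid {α : Type} (b : α → α → Bool) (x : α) (A B : List α)
    (hA : ∀ a ∈ A, b x a = false) (hB : ∀ h ∈ B.head?, b x h = true) :
    PySem.List.insertBy b x (A ++ B) = A ++ x :: B := by
  induction A with
  | nil =>
    cases B with
    | nil => simp [PySem.List.insertBy]
    | cons h t => simp [PySem.List.insertBy, hB h rfl]
  | cons a A ih =>
    have hfa : b x a = false := hA a (by simp)
    simp only [List.cons_append, PySem.List.insertBy, hfa, Bool.false_eq_true, if_false,
      List.cons.injEq, true_and]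
    exact ih (fun a' ha' => hA a' (List.mem_cons_of_mem _ ha'))

-- stable sort of a three-valued-tag list is the three filters concatenated
theorem foldl_insertBy_three (xs : List (Int × Int))
    (hx : ∀ t ∈ xs, t.1 = -1 ∨ t.1 = 0 ∨ t.1 = 1) :
    ∀ (A B C : List (Int × Int)),
      (∀ a ∈ A, a.1 = -1) → (∀ a ∈ B, a.1 = 0) → (∀ a ∈ C, a.1 = 1) →
      xs.foldl (fun acc x => PySem.List.insertBy (fun a b => decide (a.1 < b.1)) x acc) (A ++ B ++ C)
      = (A ++ xs.filter (fun t => t.1 == -1)) ++ (B ++ xs.filter (fun t => t.1 == 0))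
        ++ (C ++ xs.filter (fun t => t.1 == 1)) := by
  induction xs with
  | nil => intro A B C _ _ _; simp
  | cons t xs ih =>
    intro A B C hA hB hC
    have htl : ∀ u ∈ xs, u.1 = -1 ∨ u.1 = 0 ∨ u.1 = 1 :=
      fun u hu => hx u (List.mem_cons_of_mem _ hu)
    rcases hx t (by simp) with h | h | h
    · have hins : PySem.List.insertBy (fun a b => decide (a.1 < b.1)) t (A ++ (B ++ C))
          = A ++ t :: (B ++ C) := by
        apply insertBy_mid
        · intro a ha; simp [hA a ha, h]
        · intro hd hhd
          cases B with
          | nil =>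
            cases C with
            | nil => simp at hhd
            | cons c cs => simp at hhd; simp [hhd ▸ hC c (by simp), h]
          | cons b bs => simp at hhd; simp [hhd ▸ hB b (by simp), h]
      have := ih htl (A ++ [t]) B C
        (by intro a ha; rcases List.mem_append.mp ha with h' | h'
            · exact hA a h'
            · simp at h'; simp [h', h]) hB hC
      simp only [List.foldl_cons, List.append_assoc, hins]
      rw [show A ++ t :: (B ++ C) = (A ++ [t]) ++ (B ++ C) by simp] at *
      rw [← List.append_assoc (A ++ [t]) B C, this]
      simp [h]
    · have hins : PySem.List.insertBy (fun a b => decide (a.1 < b.1)) t ((A ++ B) ++ C)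
          = (A ++ B) ++ t :: C := by
        apply insertBy_mid
        · intro a ha; rcases List.mem_append.mp ha with h' | h'
          · simp [hA a h', h]
          · simp [hB a h', h]
        · intro hd hhd
          cases C with
          | nil => simp at hhd
          | cons c cs => simp at hhd; simp [hhd ▸ hC c (by simp), h]
      have := ih htl A (B ++ [t]) C hA
        (by intro a ha; rcases List.mem_append.mp ha with h' | h'
            · exact hB a h'
            · simp at h'; simp [h', h]) hC
      simp only [List.foldl_cons]
      rw [hins, show (A ++ B) ++ t :: C = A ++ (B ++ [t]) ++ C by simp, this]
      simp [h]
    · have hins : PySem.List.insertBy (fun a b => decide (a.1 < b.1)) t (A ++ B ++ C)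
          = (A ++ B ++ C) ++ [t] := by
        apply PySem.List.insertBy_of_forall_not_before
        intro y hy
        rcases List.mem_append.mp hy with h' | h'
        · rcases List.mem_append.mp h' with h'' | h''
          · simp [hA y h'', h]
          · simp [hB y h'', h]
        · simp [hC y h', h]
      have := ih htl A B (C ++ [t]) hA hB
        (by intro a ha; rcases List.mem_append.mp ha with h' | h'
            · exact hC a h'
            · simp at h'; simp [h', h])
      simp only [List.foldl_cons]
      rw [hins, show (A ++ B ++ C) ++ [t] = A ++ B ++ (C ++ [t]) by simp, this]
      simp [h]

-- ===== VERDICT =====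
theorem fenzu_spec : Claim_equal_fenzu := by
  intro sequence _
  unfold Spec_fenzu fenzu fenzu_alt
  cases sequence with
  | nil => simp [PySem.List.pyRange]
  | cons a t =>
    simp only [List.isEmpty_cons, Bool.false_eq_true, if_false]
    generalize hp : PySem.List.pyGetD (a :: t) (PySem.Int.floordiv ((((a :: t).length : Int)) - 1) 2) 0 = p
    -- A side
    rw [show ((a :: t).length : Int) = PySem.List.len (a :: t) from rfl,
        PySem.List.foldl_pyRange_zero_pyGetD (a :: t) 0
          (fun (acc : List Int × List Int × List Int) x =>
            if x < p then (acc.1 ++ [x], acc.2.1, acc.2.2)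
            else if x > p then (acc.1, acc.2.1 ++ [x], acc.2.2)
            else (acc.1, acc.2.1, acc.2.2 ++ [p])) ([], [], [])]
    rw [fenzu_loop]
    -- B side
    have htags : ∀ u ∈ (a :: t).map
        (fun x => ((if p < x then (1 : Int) else 0) - (if x < p then 1 else 0), x)),
        u.1 = -1 ∨ u.1 = 0 ∨ u.1 = 1 := by
      intro u hu
      rcases List.mem_map.mp hu with ⟨x, _, rfl⟩
      by_cases h1 : p < x <;> by_cases h2 : x < p <;> simp [h1, h2]
    simp only []
    rw [PySem.List.sorted_eq_foldl_insertBy]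
    have h3 := foldl_insertBy_three _ htags [] [] [] (by simp) (by simp) (by simp)
    simp only [List.append_nil, List.nil_append] at h3
    rw [h3]
    -- name the three filtered tagged lists
    set tg := fun (x : Int) => ((if p < x then (1 : Int) else 0) - (if x < p then 1 else 0), x) with htg
    have hfL : ((a :: t).map tg).filter (fun u => u.1 == -1)
        = ((a :: t).filter (fun x => x < p)).map tg := by
      rw [List.filter_map]; congr 1
      apply List.filter_congr; intro x _
      by_cases h1 : p < x <;> by_cases h2 : x < p <;> simp [htg, h1, h2] <;> omega
    have hfM : ((a :: t).map tg).filter (fun u => u.1 == 0)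
        = ((a :: t).filter (fun x => x == p)).map tg := by
      rw [List.filter_map]; congr 1
      apply List.filter_congr; intro x _
      by_cases h1 : p < x <;> by_cases h2 : x < p <;> simp [htg, h1, h2] <;> omega
    have hfR : ((a :: t).map tg).filter (fun u => u.1 == 1)
        = ((a :: t).filter (fun x => p < x)).map tg := by
      rw [List.filter_map]; congr 1
      apply List.filter_congr; intro x _
      by_cases h1 : p < x <;> by_cases h2 : x < p <;> simp [htg, h1, h2] <;> omega
    rw [hfL, hfM, hfR]
    set L := (a :: t).filter (fun x => x < p) with hL
    set M := (a :: t).filter (fun x => x == p) with hM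
    set R := (a :: t).filter (fun x => p < x) with hR
    -- counts
    have htagL : ∀ x ∈ L, tg x = (-1, x) := by
      intro x hx; have := List.of_mem_filter hx; simp at this
      simp [htg, this, not_lt_of_gt this]
    have htagM : ∀ x ∈ M, tg x = (0, x) := by
      intro x hx; have := List.of_mem_filter hx; simp at this
      simp [htg, this]
    have htagR : ∀ x ∈ R, tg x = (1, x) := by
      intro x hx; have := List.of_mem_filter hx; simp at this
      simp [htg, this, not_lt_of_gt this]
    have hcount1 : ((L.map tg ++ M.map tg ++ R.map tg).map (fun u => u.1)).count (-1)
        = L.length := by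
      simp only [List.map_append, List.count_append]
      rw [List.count_eq_length_filter, List.count_eq_length_filter, List.count_eq_length_filter]
      have e1 : (L.map tg).map (fun u => u.1) = L.map (fun _ => (-1 : Int)) := by
        rw [List.map_map]; apply List.map_congr_left; intro x hx; simp [htagL x hx]
      have e2 : (M.map tg).map (fun u => u.1) = M.map (fun _ => (0 : Int)) := by
        rw [List.map_map]; apply List.map_congr_left; intro x hx; simp [htagM x hx]
      have e3 : (R.map tg).map (fun u => u.1) = R.map (fun _ => (1 : Int)) := by
        rw [List.map_map]; apply List.map_congr_left; intro x hx; simp [htagR x hx]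
      rw [e1, e2, e3]
      simp
    have hcount0 : ((L.map tg ++ M.map tg ++ R.map tg).map (fun u => u.1)).count 0
        = M.length := by
      simp only [List.map_append, List.count_append]
      rw [List.count_eq_length_filter, List.count_eq_length_filter, List.count_eq_length_filter]
      have e1 : (L.map tg).map (fun u => u.1) = L.map (fun _ => (-1 : Int)) := by
        rw [List.map_map]; apply List.map_congr_left; intro x hx; simp [htagL x hx]
      have e2 : (M.map tg).map (fun u => u.1) = M.map (fun _ => (0 : Int)) := by
        rw [List.map_map]; apply List.map_congr_left; intro x hx; simp [htagM x hx]
      have e3 : (R.map tg).map (fun u => u.1) = R.map (fun _ => (1 : Int)) := by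
        rw [List.map_map]; apply List.map_congr_left; intro x hx; simp [htagR x hx]
      rw [e1, e2, e3]
      simp
    rw [hcount1, hcount0]
    -- slices
    have hlenL : (L.map tg).length = L.length := by simp
    have hslice1 : PySem.List.slice (L.map tg ++ M.map tg ++ R.map tg) none
        (some ((L.length : Nat) : Int)) = L.map tg := by
      rw [PySem.List.slice_to _ (by positivity), Int.toNat_natCast, List.append_assoc,
          List.take_append_of_le_length (by rw [hlenL]),
          List.take_of_length_le (by rw [hlenL])]
    have hslice2 : PySem.List.slice (L.map tg ++ M.map tg ++ R.map tg)
        (some (((L.length : Nat) : Int) + ((M.length : Nat) : Int))) none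
        = R.map tg := by
      rw [PySem.List.slice_from _ (by positivity)]
      have : ((((L.length : Nat) : Int) + ((M.length : Nat) : Int)).toNat)
          = L.length + M.length := by omega
      rw [this, show L.length + M.length = (L.map tg ++ M.map tg).length by simp,
          List.drop_left]
    rw [hslice1, hslice2]
    -- repeat
    have hrep : PySem.List.pyRepeat [p] (((L.length : Nat) : Int) + ((M.length : Nat) : Int)
        - ((L.length : Nat) : Int)) = M.map (fun _ => p) := by
      rw [PySem.List.pyRepeat_singleton]
      have : ((((L.length : Nat) : Int) + ((M.length : Nat) : Int)
          - ((L.length : Nat) : Int)).toNat) = M.length := by omega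
      rw [this]
      symm
      rw [List.eq_replicate_iff]
      refine ⟨by simp, ?_⟩
      intro b hb
      rcases List.mem_map.mp hb with ⟨x, -, rfl⟩
      rfl
    rw [hrep]
    -- projections
    have hcomp : ((fun (u : Int × Int) => u.2) ∘ tg) = id := rfl
    have hprojL : (L.map tg).map (fun u => u.2) = L := by
      rw [List.map_map, hcomp, List.map_id]
    have hprojR : (R.map tg).map (fun u => u.2) = R := by
      rw [List.map_map, hcomp, List.map_id]
    rw [hprojL, hprojR]
    simp
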